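-- pv_equiv track=rewrite | github.com/andreazedda/bmyCure4MM | chemtools/pdb_api_client.py | _assess_mm_mechanism_relevance
-- ===== SOURCE A (Python) =====
-- from typing import Dict, List, Optional, Any
--
-- def _assess_mm_mechanism_relevance(mechanisms: List[Dict]) -> int:
--     """Score mechanism relevance to MM (0-25 points)"""
--     score = 0
--
--     mm_relevant_mechanisms = {
--         'proteasome inhibit': 25,
--         'proteasome': 25,
--         'cereblon': 25,
--         'crbn': 25,
--         'imid': 25,
--         'immunomodulat': 23,
--         'hdac inhibit': 20,
--         'histone deacetylase': 20,
--         'bcl-2 inhibit': 20,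
--         'bcl2 inhibit': 20,
--         'kinase inhibit': 15,
--         'pi3k inhibit': 18,
--         'mtor inhibit': 18,
--         'akt inhibit': 18,
--         'export inhibit': 20,
--         'xpo1 inhibit': 20,
--         'cd38': 22,
--         'monoclonal antibody': 15,
--         'antibody': 12,
--         'apoptosis': 15,
--     }
--
--     for mechanism in mechanisms:
--         mech_text = mechanism.get('mechanism', '').lower()
--         action_type = mechanism.get('action_type', '').lower()
--
--         combined_text = f"{mech_text} {action_type}"
--
--         for keyword, keyword_score in mm_relevant_mechanisms.items():
--             if keyword in combined_text:
--                 score = max(score, keyword_score)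
--
--     return score
-- ===== SOURCE B (Python) =====
-- from typing import Dict, List
--
-- # keywords grouped by score, buckets in descending score order
-- _MM_SCORE_BUCKETS = [
--     (25, ['proteasome inhibit', 'proteasome', 'cereblon', 'crbn', 'imid']),
--     (23, ['immunomodulat']),
--     (22, ['cd38']),
--     (20, ['hdac inhibit', 'histone deacetylase', 'bcl-2 inhibit',
--           'bcl2 inhibit', 'export inhibit', 'xpo1 inhibit']),
--     (18, ['pi3k inhibit', 'mtor inhibit', 'akt inhibit']),
--     (15, ['kinase inhibit', 'monoclonal antibody', 'apoptosis']),
--     (12, ['antibody']),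
-- ]
--
--
-- def _assess_mm_mechanism_relevance(mechanisms: List[Dict]) -> int:
--     """Score mechanism relevance to MM (0-25 points): walk score buckets from
--     highest to lowest and return the first bucket's score whose keywords hit
--     any mechanism's combined text; 0 if no bucket matches."""
--     texts = [
--         f"{m.get('mechanism', '').lower()} {m.get('action_type', '').lower()}"
--         for m in mechanisms
--     ]
--     for score, keywords in _MM_SCORE_BUCKETS:
--         if any(kw in t for kw in keywords for t in texts):
--             return score
--     return 0
-- ===== Notes on version B (the rewrite author's own statement) =====
-- stated objective: alternative
-- what changed: A accumulates a running max over a double loop (every mechanism against all 20 flat keyword/score dict entries); B pre-groups the keywords into fixed score buckets sorted descending, precomputes each mechanism's combined text once, and walks the buckets from highest score down, returning on the first bucket with any hit (0 if none), so no max accumulator and an early exit.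
import Mathlib
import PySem

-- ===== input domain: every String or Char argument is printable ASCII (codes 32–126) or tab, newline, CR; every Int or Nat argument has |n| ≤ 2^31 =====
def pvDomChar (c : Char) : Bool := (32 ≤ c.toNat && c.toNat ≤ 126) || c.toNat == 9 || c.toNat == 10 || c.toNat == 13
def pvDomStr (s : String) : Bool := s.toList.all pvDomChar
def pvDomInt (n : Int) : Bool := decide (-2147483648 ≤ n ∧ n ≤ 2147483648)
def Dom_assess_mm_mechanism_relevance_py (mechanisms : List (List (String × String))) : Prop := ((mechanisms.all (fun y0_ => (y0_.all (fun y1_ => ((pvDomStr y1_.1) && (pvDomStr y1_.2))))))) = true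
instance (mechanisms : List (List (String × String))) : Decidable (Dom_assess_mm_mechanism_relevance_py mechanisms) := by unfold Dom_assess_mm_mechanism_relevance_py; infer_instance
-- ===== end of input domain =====

-- B replaces A's accumulate-a-max double loop by fixed score buckets sorted descending:
-- it walks the buckets from highest score down and returns at the first bucket whose
-- keywords hit any mechanism text (objective: alternative).


-- ===== PORT A =====
-- the dict literal mm_relevant_mechanisms, in insertion order (all keys distinct)
def pvKeywords : List (String × Int) :=
  [("proteasome inhibit", 25), ("proteasome", 25), ("cereblon", 25), ("crbn", 25),
   ("imid", 25), ("immunomodulat", 23), ("hdac inhibit", 20), ("histone deacetylase", 20),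
   ("bcl-2 inhibit", 20), ("bcl2 inhibit", 20), ("kinase inhibit", 15), ("pi3k inhibit", 18),
   ("mtor inhibit", 18), ("akt inhibit", 18), ("export inhibit", 20), ("xpo1 inhibit", 20),
   ("cd38", 22), ("monoclonal antibody", 15), ("antibody", 12), ("apoptosis", 15)]

-- f"{mechanism.get('mechanism','').lower()} {mechanism.get('action_type','').lower()}" (identical in A and B)
def pvCombined (m : List (String × String)) : String :=
  PySem.Str.lower ((PySem.Dict.ofList m).getD "mechanism" "") ++ " " ++
    PySem.Str.lower ((PySem.Dict.ofList m).getD "action_type" "")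

def assess_mm_mechanism_relevance_py (mechanisms : List (List (String × String))) : Int :=
  mechanisms.foldl (fun score mechanism =>
    let combined_text := pvCombined mechanism
    pvKeywords.foldl (fun s kv =>
      if PySem.Str.isIn kv.1 combined_text then max s kv.2 else s) score) 0

-- ===== PORT B =====
-- _MM_SCORE_BUCKETS: keywords grouped by score, buckets in descending score order
def pvBuckets : List (Int × List String) :=
  [(25, ["proteasome inhibit", "proteasome", "cereblon", "crbn", "imid"]),
   (23, ["immunomodulat"]),
   (22, ["cd38"]),
   (20, ["hdac inhibit", "histone deacetylase", "bcl-2 inhibit",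
         "bcl2 inhibit", "export inhibit", "xpo1 inhibit"]),
   (18, ["pi3k inhibit", "mtor inhibit", "akt inhibit"]),
   (15, ["kinase inhibit", "monoclonal antibody", "apoptosis"]),
   (12, ["antibody"])]

-- for score, keywords in _MM_SCORE_BUCKETS: if any(kw in t …): return score / return 0
def pvBucketSearch (texts : List String) : List (Int × List String) → Int
  | [] => 0
  | (sc, ks) :: rest =>
      if ks.any (fun kw => texts.any (fun t => PySem.Str.isIn kw t)) then sc
      else pvBucketSearch texts rest

def assess_mm_mechanism_relevance_py_alt (mechanisms : List (List (String × String))) : Int :=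
  pvBucketSearch (mechanisms.map pvCombined) pvBuckets

-- ===== PRECONDITION & SPEC =====
def Spec_assess_mm_mechanism_relevance_py (mechanisms : List (List (String × String))) (out : Int) : Prop := out = assess_mm_mechanism_relevance_py_alt mechanisms
instance (mechanisms : List (List (String × String))) (out : Int) : Decidable (Spec_assess_mm_mechanism_relevance_py mechanisms out) := by unfold Spec_assess_mm_mechanism_relevance_py; infer_instance

-- ===== CLAIM (what is proved, stated in full; the proofs are below) =====
def Claim_equal_assess_mm_mechanism_relevance_py : Prop := ∀ (mechanisms : List (List (String × String))), Dom_assess_mm_mechanism_relevance_py mechanisms → Spec_assess_mm_mechanism_relevance_py mechanisms (assess_mm_mechanism_relevance_py mechanisms)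

-- ===== LEMMAS AND PROOFS =====

-- the loop body of A's inner loop: "if the keyword matches, raise the running max to its score"
def pvStep (q : String → Bool) (s : Int) (kv : String × Int) : Int :=
  if q kv.1 then max s kv.2 else s

theorem pvStep_rcomm (q : String → Bool) : ∀ (s : Int) (a b : String × Int),
    pvStep q (pvStep q s a) b = pvStep q (pvStep q s b) a := by
  intro s a b
  unfold pvStep
  split_ifs <;> simp [max_comm, max_left_comm]

theorem pv_foldl_step_max (q : String → Bool) (K : List (String × Int)) :
    ∀ (s v : Int), K.foldl (pvStep q) (max s v) = max (K.foldl (pvStep q) s) v := by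
  induction K with
  | nil => intro s v; simp
  | cons x rest ih =>
      intro s v
      simp only [List.foldl_cons]
      rw [← ih]
      congr 1
      unfold pvStep
      split_ifs
      · rw [max_right_comm]
      · rfl

theorem pv_step_foldl_comm (q q' : String → Bool) (L : List (String × Int))
    (s : Int) (x : String × Int) :
    pvStep q' (L.foldl (pvStep q) s) x = L.foldl (pvStep q) (pvStep q' s x) := by
  by_cases h : q' x.1 = true
  · have e : ∀ t : Int, pvStep q' t x = max t x.2 := fun t => by simp [pvStep, h]
    rw [e, e]
    exact (pv_foldl_step_max q L s x.2).symm
  · have e : ∀ t : Int, pvStep q' t x = t := fun t => by simp [pvStep, h]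
    rw [e, e]

theorem pv_step_or (a b : String → Bool) (s : Int) (x : String × Int) :
    pvStep b (pvStep a s x) x = pvStep (fun y => a y || b y) s x := by
  simp only [pvStep]
  split_ifs <;> simp_all

theorem pv_foldl_merge (a b : String → Bool) (K : List (String × Int)) :
    ∀ s : Int, K.foldl (pvStep b) (K.foldl (pvStep a) s)
      = K.foldl (pvStep (fun x => a x || b x)) s := by
  induction K with
  | nil => intro s; rfl
  | cons x rest ih =>
      intro s
      simp only [List.foldl_cons]
      rw [pv_step_foldl_comm, pv_step_or, ih]

theorem pv_foldl_false (K : List (String × Int)) : ∀ s : Int,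
    K.foldl (pvStep (fun _ => false)) s = s := by
  induction K with
  | nil => intro s; rfl
  | cons x rest ih => intro s; simpa [pvStep] using ih _

-- A's double loop computes the running max over keywords matched by ANY mechanism
theorem pvA_char (ms : List (List (String × String))) : ∀ s : Int,
    ms.foldl (fun score mechanism =>
        pvKeywords.foldl (fun t kv =>
          if PySem.Str.isIn kv.1 (pvCombined mechanism) then max t kv.2 else t) score) s
      = pvKeywords.foldl
          (pvStep (fun kw => ms.any (fun m => PySem.Str.isIn kw (pvCombined m)))) s := by
  induction ms with
  | nil =>
      intro s
      simp only [List.foldl_nil, List.any_nil]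
      exact (pv_foldl_false pvKeywords s).symm
  | cons m ms ih =>
      intro s
      simp only [List.foldl_cons, List.any_cons]
      rw [ih, ← pv_foldl_merge (fun kw => PySem.Str.isIn kw (pvCombined m))]
      rfl

theorem pv_foldl_absorb (q : String → Bool) (L : List (String × Int)) :
    ∀ s : Int, (∀ kv ∈ L, kv.2 ≤ s) → L.foldl (pvStep q) s = s := by
  induction L with
  | nil => intro s _; rfl
  | cons x rest ih =>
      intro s h
      simp only [List.foldl_cons]
      have hx : pvStep q s x = s := by
        unfold pvStep
        split_ifs
        · exact max_eq_left (h x (List.mem_cons_self))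
        · rfl
      rw [hx]
      exact ih s (fun kv hkv => h kv (List.mem_cons_of_mem _ hkv))

-- flattening of the buckets back into (keyword, score) pairs
def pvFlat (bs : List (Int × List String)) : List (String × Int) :=
  bs.flatMap (fun b => b.2.map (fun kw => (kw, b.1)))

-- folding pvStep over one bucket's pairs is "raise to sc if any keyword matches"
theorem pv_bucket_fold (q : String → Bool) (sc : Int) (ks : List String) :
    ∀ s : Int, (ks.map (fun kw => (kw, sc))).foldl (pvStep q) s
      = if ks.any q then max s sc else s := by
  induction ks with
  | nil => intro s; simp
  | cons kw rest ih =>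
      intro s
      simp only [List.map_cons, List.foldl_cons, List.any_cons, pvStep]
      by_cases h : q kw = true
      · simp only [h, if_true, Bool.true_or, ih]
        split_ifs <;> simp
      · simp [h, ih]

-- B's bucket walk on a descending, nonnegative bucket list equals the running max on the flattening
theorem pvB_char (texts : List String) : ∀ (bs : List (Int × List String)),
    bs.Pairwise (fun a b => b.1 ≤ a.1) → (∀ b ∈ bs, 0 ≤ b.1) →
    pvBucketSearch texts bs
      = (pvFlat bs).foldl (pvStep (fun kw => texts.any (fun t => PySem.Str.isIn kw t))) 0 := by
  intro bs
  induction bs with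
  | nil => intro _ _; rfl
  | cons b rest ih =>
      intro hpw hnn
      obtain ⟨sc, ks⟩ := b
      rw [List.pairwise_cons] at hpw
      simp only [pvBucketSearch, pvFlat, List.flatMap_cons, List.foldl_append]
      rw [pv_bucket_fold]
      by_cases hq : ks.any (fun kw => texts.any fun t => PySem.Str.isIn kw t) = true
      · simp only [hq, if_true]
        rw [max_eq_right (hnn _ (List.mem_cons_self))]
        refine (pv_foldl_absorb _ _ _ ?_).symm
        intro kv hkv
        rcases List.mem_flatMap.mp hkv with ⟨b', hb', hkv'⟩
        rcases List.mem_map.mp hkv' with ⟨kw, _, rfl⟩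
        exact hpw.1 b' hb'
      · simp only [hq]
        exact ih hpw.2 (fun b hb => hnn b (List.mem_cons_of_mem _ hb))

-- ===== VERDICT (by name: the statement is the Claim_ definition above) =====
theorem assess_mm_mechanism_relevance_py_spec : Claim_equal_assess_mm_mechanism_relevance_py := by
  intro ms _
  unfold Spec_assess_mm_mechanism_relevance_py
  have hA : assess_mm_mechanism_relevance_py ms
      = pvKeywords.foldl
          (pvStep (fun kw => ms.any fun m => PySem.Str.isIn kw (pvCombined m))) 0 :=
    pvA_char ms 0
  have hpw : pvBuckets.Pairwise (fun a b : Int × List String => b.1 ≤ a.1) := by decide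
  have hnn : ∀ b ∈ pvBuckets, (0 : Int) ≤ b.1 := by decide
  have hB : assess_mm_mechanism_relevance_py_alt ms
      = (pvFlat pvBuckets).foldl
          (pvStep (fun kw => (ms.map pvCombined).any fun t => PySem.Str.isIn kw t)) 0 :=
    pvB_char (ms.map pvCombined) pvBuckets hpw hnn
  have hq : (fun kw => (ms.map pvCombined).any fun t => PySem.Str.isIn kw t)
      = fun kw => ms.any fun m => PySem.Str.isIn kw (pvCombined m) := by
    funext kw; rw [List.any_map, Function.comp_def]
  have hperm : (pvFlat pvBuckets).Perm pvKeywords := by decide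
  rw [hA, hB, hq]
  haveI : RightCommutative
      (pvStep (fun kw => ms.any fun m => PySem.Str.isIn kw (pvCombined m))) :=
    ⟨fun s a b => pvStep_rcomm _ s a b⟩
  exact (List.Perm.foldl_eq hperm 0).symm
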